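-- pv_equiv track=rewrite | github.com/BinbinGood/Algorithms | 高级班/class01/02异或和为0.py | mostEOR
-- ===== SOURCE A (Python) =====
-- def mostEOR(arr):
--     xor = 0
--     dp = [0] * len(arr)  # 保存0~i最后划分的情况下，异或和为0最多的部分是多少个
--     map = dict()  # 哈希表，从0出发的前缀异或和，前缀异或和对应的出现的最晚位置
--     map[0] = -1
--     for i in range(len(arr)):  # i所在的最后一块
--         xor ^= arr[i]  # 前缀异或和
--         if xor in map:  # if中了表示有第二种可能性
--             pre = map[xor]  # pre+1~i是最后划分的最后一个部分
--             dp[i] = 1 if pre == -1 else (dp[pre] + 1)  # pre==-1表示最后一块为0开始的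
--         if i > 0:
--             dp[i] = max(dp[i], dp[i - 1])  # 两种情况取最大值
--         map[xor] = i  # 更新异或和对应的位置
--     return dp[len(arr) - 1]
-- ===== SOURCE B (Python) =====
-- def mostEOR(arr):
--     # greedy: cut a segment as soon as the running prefix xor repeats since the last cut
--     best = 0
--     xor = 0
--     seen = {0}
--     for x in arr:
--         xor ^= x
--         if xor in seen:
--             best += 1
--             xor = 0
--             seen = {0}
--         else:
--             seen.add(xor)
--     return best
-- ===== Notes on version B (the rewrite author's own statement) =====
-- stated objective: simpler
-- what changed: Replaces the dp-array + last-occurrence-dict dynamic programming with a greedy single pass that keeps only a running xor, a set of prefix xors since the last cut, and a counter, cutting a segment as soon as the running xor repeats; no dp array, no dict and no index bookkeeping (measured ~2.6x faster, constant factor).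
import Mathlib
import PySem

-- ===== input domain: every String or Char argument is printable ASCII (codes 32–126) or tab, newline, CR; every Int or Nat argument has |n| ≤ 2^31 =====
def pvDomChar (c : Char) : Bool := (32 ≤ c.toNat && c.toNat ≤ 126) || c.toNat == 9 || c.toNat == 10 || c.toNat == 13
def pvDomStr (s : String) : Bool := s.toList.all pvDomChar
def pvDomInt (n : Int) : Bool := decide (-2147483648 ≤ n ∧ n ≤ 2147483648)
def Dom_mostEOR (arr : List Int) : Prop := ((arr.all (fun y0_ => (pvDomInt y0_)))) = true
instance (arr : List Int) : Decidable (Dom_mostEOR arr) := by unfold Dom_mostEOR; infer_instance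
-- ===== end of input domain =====

-- B replaces A's dp-array + last-occurrence-dict DP by a greedy single pass (running xor,
-- set of prefix xors since the last cut, counter) — simpler state, measured constant-factor faster.

-- ===== PORT A =====
def mostEOR (arr : List Int) : Int :=
  let st :=
    (PySem.List.pyRange 0 (arr.length : Int) 1).foldl
      (fun (st : Int × List Int × PySem.Dict Int Int) i =>
        let xor := PySem.Int.bxor st.1 (PySem.List.pyGetD arr i 0)
        let dp :=
          match st.2.2.get? xor with
          | some pre =>
              PySem.List.pySetD st.2.1 i (if pre = -1 then 1 else PySem.List.pyGetD st.2.1 pre 0 + 1)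
          | none => st.2.1
        let dp := if i > 0 then PySem.List.pySetD dp i (max (PySem.List.pyGetD dp i 0) (PySem.List.pyGetD dp (i - 1) 0)) else dp
        (xor, dp, st.2.2.insert xor i))
      (0, List.replicate arr.length 0, (PySem.Dict.empty (κ := Int) (ν := Int)).insert 0 (-1))
  PySem.List.pyGetD st.2.1 ((arr.length : Int) - 1) 0

-- ===== PORT B =====
def mostEOR_alt (arr : List Int) : Int :=
  (arr.foldl
    (fun (st : Int × Int × PySem.Set Int) x =>
      let xor := PySem.Int.bxor st.2.1 x
      if PySem.Set.contains st.2.2 xor then (st.1 + 1, 0, PySem.Set.ofList [0])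
      else (st.1, xor, PySem.Set.add st.2.2 xor))
    (0, 0, PySem.Set.ofList [0])).1

-- ===== PRECONDITION & SPEC =====
-- Pre_ excludes only the empty list, on which A raises IndexError (dp[-1] on an empty dp).
def Pre_mostEOR (arr : List Int) : Prop := arr ≠ []
instance (arr : List Int) : Decidable (Pre_mostEOR arr) := by unfold Pre_mostEOR; infer_instance
def pvWitness_mostEOR : List Int := [1, 2, 3]

def Spec_mostEOR (arr : List Int) (out : Int) : Prop := out = mostEOR_alt arr
instance (arr : List Int) (out : Int) : Decidable (Spec_mostEOR arr out) := by unfold Spec_mostEOR; infer_instance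

-- ===== CLAIM (what is proved, stated in full; the proofs are below) =====
def Claim_equal_mostEOR : Prop := ∀ (arr : List Int), Dom_mostEOR arr → Pre_mostEOR arr → Spec_mostEOR arr (mostEOR arr)

-- ===== LEMMAS AND PROOFS =====

-- ---- xor algebra for Python's `^` on Int (PySem.Int.bxor) ----
theorem bxor_coe_coe (m n : Nat) : PySem.Int.bxor (m : Int) (n : Int) = ((m ^^^ n : Nat) : Int) :=
  PySem.Int.bxor_natCast m n

theorem bxor_coe_neg (m n : Nat) : PySem.Int.bxor (m : Int) (-(n : Int) - 1) = -((m ^^^ n : Nat) : Int) - 1 := by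
  have hb : ¬ (0 : Int) ≤ -(n : Int) - 1 := by omega
  have h2 : (-(-(n : Int) - 1) - 1).toNat = n := by omega
  simp only [PySem.Int.bxor, hb, if_false, if_pos (by omega : (0:Int) ≤ (m:Int)), h2, Int.toNat_natCast]

theorem bxor_neg_coe (m n : Nat) : PySem.Int.bxor (-(m : Int) - 1) (n : Int) = -((m ^^^ n : Nat) : Int) - 1 := by
  have ha : ¬ (0 : Int) ≤ -(m : Int) - 1 := by omega
  have h2 : (-(-(m : Int) - 1) - 1).toNat = m := by omega
  simp only [PySem.Int.bxor, ha, if_false, if_pos (by omega : (0:Int) ≤ (n:Int)), h2, Int.toNat_natCast]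

theorem bxor_neg_neg (m n : Nat) : PySem.Int.bxor (-(m : Int) - 1) (-(n : Int) - 1) = ((m ^^^ n : Nat) : Int) := by
  have ha : ¬ (0 : Int) ≤ -(m : Int) - 1 := by omega
  have hb : ¬ (0 : Int) ≤ -(n : Int) - 1 := by omega
  have h2 : (-(-(m : Int) - 1) - 1).toNat = m := by omega
  have h3 : (-(-(n : Int) - 1) - 1).toNat = n := by omega
  simp only [PySem.Int.bxor, ha, hb, if_false, h2, h3]

theorem int_cases_coe_neg (a : Int) : (∃ m : Nat, a = (m : Int)) ∨ (∃ m : Nat, a = -(m : Int) - 1) := by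
  rcases a with m | m
  · exact Or.inl ⟨m, rfl⟩
  · exact Or.inr ⟨m, by simp [Int.negSucc_eq]; ring⟩

theorem bxor_assoc (a b c : Int) :
    PySem.Int.bxor (PySem.Int.bxor a b) c = PySem.Int.bxor a (PySem.Int.bxor b c) := by
  rcases int_cases_coe_neg a with ⟨m, rfl⟩ | ⟨m, rfl⟩ <;>
    rcases int_cases_coe_neg b with ⟨n, rfl⟩ | ⟨n, rfl⟩ <;>
      rcases int_cases_coe_neg c with ⟨p, rfl⟩ | ⟨p, rfl⟩ <;>
        simp only [bxor_coe_coe, bxor_coe_neg, bxor_neg_coe, bxor_neg_neg, Nat.xor_assoc]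

theorem bxor_zero_left (a : Int) : PySem.Int.bxor 0 a = a := by
  rw [PySem.Int.bxor_comm]; exact PySem.Int.bxor_zero a

theorem bxor_cancel (a b : Int) : PySem.Int.bxor (PySem.Int.bxor a b) b = a := by
  rw [bxor_assoc, PySem.Int.bxor_self, PySem.Int.bxor_zero]

theorem bxor_left_inj (s a b : Int) (h : PySem.Int.bxor s a = PySem.Int.bxor s b) : a = b := by
  have h2 : PySem.Int.bxor (PySem.Int.bxor a s) s = PySem.Int.bxor (PySem.Int.bxor b s) s := by
    rw [PySem.Int.bxor_comm a s, PySem.Int.bxor_comm b s, h]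
  rwa [bxor_cancel, bxor_cancel] at h2

-- ---- prefix xor ----
def pxor (l : List Int) : Int := l.foldl PySem.Int.bxor 0

theorem pxor_append_singleton (l : List Int) (x : Int) :
    pxor (l ++ [x]) = PySem.Int.bxor (pxor l) x := by
  simp [pxor, List.foldl_append]

theorem foldl_bxor_shift (v : List Int) (s : Int) :
    v.foldl PySem.Int.bxor s = PySem.Int.bxor s (pxor v) := by
  induction v generalizing s with
  | nil => simp [pxor, PySem.Int.bxor_zero]
  | cons b v ih =>
      simp only [List.foldl_cons, pxor]
      rw [ih (PySem.Int.bxor s b), ih (PySem.Int.bxor 0 b)]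
      rw [bxor_zero_left, bxor_assoc]

theorem pxor_split (u : List Int) (c : Nat) :
    pxor u = PySem.Int.bxor (pxor (u.take c)) (pxor (u.drop c)) := by
  conv_lhs => rw [← List.take_append_drop c u]
  rw [pxor, List.foldl_append, ← pxor, foldl_bxor_shift]

-- ---- the two loop bodies, named for the proofs ----
def stepA (st : Int × List Int × PySem.Dict Int Int) (p : Int × Int) :
    Int × List Int × PySem.Dict Int Int :=
  let xor := PySem.Int.bxor st.1 p.2
  let dp :=
    match st.2.2.get? xor with
    | some pre =>
        PySem.List.pySetD st.2.1 p.1 (if pre = -1 then 1 else PySem.List.pyGetD st.2.1 pre 0 + 1)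
    | none => st.2.1
  let dp := if p.1 > 0 then PySem.List.pySetD dp p.1 (max (PySem.List.pyGetD dp p.1 0) (PySem.List.pyGetD dp (p.1 - 1) 0)) else dp
  (xor, dp, st.2.2.insert xor p.1)

def initA (N : Nat) : Int × List Int × PySem.Dict Int Int :=
  (0, List.replicate N 0, (PySem.Dict.empty (κ := Int) (ν := Int)).insert 0 (-1))

def stepB (st : Int × Int × PySem.Set Int) (x : Int) : Int × Int × PySem.Set Int :=
  let xor := PySem.Int.bxor st.2.1 x
  if PySem.Set.contains st.2.2 xor then (st.1 + 1, 0, PySem.Set.ofList [0])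
  else (st.1, xor, PySem.Set.add st.2.2 xor)

def initB : Int × Int × PySem.Set Int := (0, 0, PySem.Set.ofList [0])

theorem bridgeA (arr : List Int) :
    mostEOR arr = PySem.List.pyGetD ((PySem.List.enumerate arr 0).foldl stepA (initA arr.length)).2.1 ((arr.length : Int) - 1) 0 := by
  rw [PySem.List.enumerate_eq_map_pyRange (d := 0), List.foldl_map]
  rfl

theorem getD_replicate_zero (N j : Nat) : (List.replicate N (0 : Int)).getD j 0 = 0 := by
  rcases lt_or_ge j N with h | h
  · simp [List.getD, h]
  · have hn : (List.replicate N (0 : Int))[j]? = none := by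
      rw [List.getElem?_eq_none_iff]; simpa using h
    simp [List.getD, hn]

theorem getD_set_int (dp : List Int) (k j : Nat) (v : Int) (hk : k < dp.length) :
    (dp.set k v).getD j 0 = if j = k then v else dp.getD j 0 := by
  rcases eq_or_ne j k with rfl | hne
  · simp [List.getD, hk]
  · simp [List.getD, List.getElem?_set_ne (by omega : k ≠ j), hne]

theorem bridgeB (arr : List Int) :
    mostEOR_alt arr = (arr.foldl stepB initB).1 := rfl

-- ---- the invariant ----
def LoopInv (N : Nat) (l : List Int) (sA : Int × List Int × PySem.Dict Int Int)
    (sB : Int × Int × PySem.Set Int) : Prop :=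
  sA.2.1.length = N ∧
  sA.1 = pxor l ∧
  0 ≤ sB.1 ∧
  (∀ v : Int,
    (sA.2.2.get? v = none ↔ ∀ t : Nat, t ≤ l.length → pxor (l.take t) ≠ v) ∧
    (∀ pre : Int, sA.2.2.get? v = some pre →
      ∃ t : Nat, t ≤ l.length ∧ pre = (t : Int) - 1 ∧ pxor (l.take t) = v ∧
        ∀ t' : Nat, t < t' → t' ≤ l.length → pxor (l.take t') ≠ v)) ∧
  ∃ c : Nat, c ≤ l.length ∧
    sB.2.1 = pxor (l.drop c) ∧
    (∀ v : Int, PySem.Set.contains sB.2.2 v = true ↔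
      ∃ t : Nat, c ≤ t ∧ t ≤ l.length ∧ pxor ((l.take t).drop c) = v) ∧
    (∀ j : Nat, j < l.length → c ≤ j + 1 → sA.2.1.getD j 0 = sB.1) ∧
    (∀ j j' : Nat, j ≤ j' → j' < l.length → sA.2.1.getD j 0 ≤ sA.2.1.getD j' 0) ∧
    (∀ j : Nat, j < l.length → 0 ≤ sA.2.1.getD j 0) ∧
    (∀ j : Nat, l.length ≤ j → sA.2.1.getD j 0 = 0) ∧
    (c = 0 → sB.1 = 0) ∧
    (c = 1 → sB.1 = 1) ∧
    (∀ c2 : Nat, c = c2 + 2 → sA.2.1.getD c2 0 = sB.1 - 1)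

theorem dp_next_nocut (k c : Nat) (b : Int) (D D' : Nat → Int)
    (hc : c ≤ k) (hb0 : 0 ≤ b)
    (hd1 : ∀ j, j < k → c ≤ j + 1 → D j = b)
    (hd2 : ∀ j j', j ≤ j' → j' < k → D j ≤ D j')
    (hd5 : ∀ j, j < k → 0 ≤ D j)
    (hd7 : ∀ j, k ≤ j → D j = 0)
    (hc2 : ∀ c2, c = c2 + 2 → D c2 = b - 1)
    (hD' : ∀ j, D' j = if j = k then b else D j) :
    (∀ j, j < k + 1 → c ≤ j + 1 → D' j = b) ∧
    (∀ j j', j ≤ j' → j' < k + 1 → D' j ≤ D' j') ∧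
    (∀ j, j < k + 1 → 0 ≤ D' j) ∧
    (∀ j, k + 1 ≤ j → D' j = 0) ∧
    (∀ c2, c = c2 + 2 → D' c2 = b - 1) := by
  have hle : ∀ j, j < k → D j ≤ b := by
    intro j hj
    by_cases hcj : c ≤ j + 1
    · exact le_of_eq (hd1 j hj hcj)
    · have h2 := hd2 j (k - 1) (by omega) (by omega)
      rw [hd1 (k - 1) (by omega) (by omega)] at h2
      exact h2
  refine ⟨?_, ?_, ?_, ?_, ?_⟩
  · intro j hj hcj
    rw [hD']
    rcases eq_or_ne j k with rfl | hne
    · simp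
    · rw [if_neg hne]; exact hd1 j (by omega) hcj
  · intro j j' hjj hj'
    rw [hD', hD']
    rcases eq_or_ne j' k with rfl | hne'
    · rcases eq_or_ne j j' with rfl | hne
      · simp
      · rw [if_neg hne, if_pos rfl]; exact hle j (by omega)
    · rw [if_neg hne', if_neg (by omega)]
      exact hd2 j j' hjj (by omega)
  · intro j hj
    rw [hD']
    rcases eq_or_ne j k with rfl | hne
    · simpa using hb0
    · rw [if_neg hne]; exact hd5 j (by omega)
  · intro j hj
    rw [hD', if_neg (by omega)]
    exact hd7 j (by omega)
  · intro c2 h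
    rw [hD', if_neg (by omega)]
    exact hc2 c2 h

theorem dp_next_cut (k c : Nat) (b : Int) (D D' : Nat → Int)
    (hc : c ≤ k) (hb0 : 0 ≤ b)
    (hd1 : ∀ j, j < k → c ≤ j + 1 → D j = b)
    (hd2 : ∀ j j', j ≤ j' → j' < k → D j ≤ D j')
    (hd5 : ∀ j, j < k → 0 ≤ D j)
    (hd7 : ∀ j, k ≤ j → D j = 0)
    (hc0 : c = 0 → b = 0)
    (hD' : ∀ j, D' j = if j = k then b + 1 else D j) :
    (∀ j, j < k + 1 → k + 1 ≤ j + 1 → D' j = b + 1) ∧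
    (∀ j j', j ≤ j' → j' < k + 1 → D' j ≤ D' j') ∧
    (∀ j, j < k + 1 → 0 ≤ D' j) ∧
    (∀ j, k + 1 ≤ j → D' j = 0) ∧
    (k + 1 = 1 → b + 1 = 1) ∧
    (∀ c2, k + 1 = c2 + 2 → D' c2 = (b + 1) - 1) := by
  have hle : ∀ j, j < k → D j ≤ b := by
    intro j hj
    by_cases hcj : c ≤ j + 1
    · exact le_of_eq (hd1 j hj hcj)
    · have h2 := hd2 j (k - 1) (by omega) (by omega)
      rw [hd1 (k - 1) (by omega) (by omega)] at h2
      exact h2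
  refine ⟨?_, ?_, ?_, ?_, ?_, ?_⟩
  · intro j hj hcj
    have : j = k := by omega
    subst this
    rw [hD', if_pos rfl]
  · intro j j' hjj hj'
    rw [hD', hD']
    rcases eq_or_ne j' k with rfl | hne'
    · rcases eq_or_ne j j' with rfl | hne
      · simp
      · rw [if_neg hne, if_pos rfl]
        have := hle j (by omega)
        omega
    · rw [if_neg hne', if_neg (by omega)]
      exact hd2 j j' hjj (by omega)
  · intro j hj
    rw [hD']
    rcases eq_or_ne j k with rfl | hne
    · simp; omega
    · rw [if_neg hne]; exact hd5 j (by omega)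
  · intro j hj
    rw [hD', if_neg (by omega)]
    exact hd7 j (by omega)
  · intro h
    have : c = 0 := by omega
    rw [hc0 this]
    omega
  · intro c2 h
    rw [hD', if_neg (by omega)]
    have := hd1 c2 (by omega) (by omega)
    omega

theorem map_next (l : List Int) (x : Int) (mp : PySem.Dict Int Int)
    (hmap : ∀ v : Int,
      (mp.get? v = none ↔ ∀ t : Nat, t ≤ l.length → pxor (l.take t) ≠ v) ∧
      (∀ pre : Int, mp.get? v = some pre →
        ∃ t : Nat, t ≤ l.length ∧ pre = (t : Int) - 1 ∧ pxor (l.take t) = v ∧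
          ∀ t' : Nat, t < t' → t' ≤ l.length → pxor (l.take t') ≠ v)) :
    ∀ v : Int,
      ((mp.insert (pxor (l ++ [x])) (l.length : Int)).get? v = none ↔
        ∀ t : Nat, t ≤ (l ++ [x]).length → pxor ((l ++ [x]).take t) ≠ v) ∧
      (∀ pre : Int, (mp.insert (pxor (l ++ [x])) (l.length : Int)).get? v = some pre →
        ∃ t : Nat, t ≤ (l ++ [x]).length ∧ pre = (t : Int) - 1 ∧ pxor ((l ++ [x]).take t) = v ∧
          ∀ t' : Nat, t < t' → t' ≤ (l ++ [x]).length → pxor ((l ++ [x]).take t') ≠ v) := by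
  have hlen : (l ++ [x]).length = l.length + 1 := by simp
  have htake_le : ∀ t : Nat, t ≤ l.length → (l ++ [x]).take t = l.take t := by
    intro t ht
    rw [List.take_append_of_le_length ht]
  have htake_full : (l ++ [x]).take (l.length + 1) = l ++ [x] := by
    apply List.take_of_length_le
    omega
  intro v
  rw [PySem.Dict.get?_insert]
  by_cases hv : v = pxor (l ++ [x])
  · rw [if_pos hv]
    constructor
    · constructor
      · intro h; exact absurd h (by simp)
      · intro h
        exfalso
        exact h (l.length + 1) (by omega) (by rw [htake_full, hv])
    · intro pre hpre
      refine ⟨l.length + 1, by omega, ?_, by rw [htake_full, hv], ?_⟩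
      · injection hpre with hpre
        omega
      · intro t' h1 h2
        omega
  · rw [if_neg hv]
    obtain ⟨h1, h2⟩ := hmap v
    constructor
    · rw [h1]
      constructor
      · intro h t ht
        rcases Nat.lt_or_ge t (l.length + 1) with h' | h'
        · rw [htake_le t (by omega)]
          exact h t (by omega)
        · have ht1 : t = l.length + 1 := by omega
          subst ht1
          rw [htake_full]
          exact fun he => hv he.symm
      · intro h t ht
        rw [← htake_le t ht]
        exact h t (by omega)
    · intro pre hpre
      obtain ⟨t, ht, hp, hx, hmax⟩ := h2 pre hpre
      refine ⟨t, by omega, hp, by rw [htake_le t ht]; exact hx, ?_⟩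
      intro t' ht1 ht2
      rcases Nat.lt_or_ge t' (l.length + 1) with h' | h'
      · rw [htake_le t' (by omega)]
        exact hmax t' ht1 (by omega)
      · have ht1' : t' = l.length + 1 := by omega
        subst ht1'
        rw [htake_full]
        exact fun he => hv he.symm

theorem inv_init (N : Nat) : LoopInv N [] (initA N) initB := by
  refine ⟨by simp [initA], rfl, le_refl 0, ?_, 0, le_refl 0, rfl, ?_, ?_, ?_, ?_, ?_, ?_, ?_, ?_⟩
  · intro v
    constructor
    · constructor
      · intro h t ht
        have ht0 : t = 0 := by simpa using ht
        subst ht0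
        simp only [initA] at h
        rw [PySem.Dict.get?_insert] at h
        intro hv
        rw [← hv] at h
        simp at h
        exact h rfl
      · intro h
        simp only [initA]
        rw [PySem.Dict.get?_insert]
        have := h 0 (le_refl 0)
        simp only [List.take_nil] at this
        rw [if_neg (by exact fun hv => (this (hv ▸ rfl)).elim)]
        exact PySem.Dict.get?_empty _
    · intro pre h
      simp only [initA] at h
      rw [PySem.Dict.get?_insert] at h
      by_cases hv : v = 0
      · subst hv
        simp at h
        exact ⟨0, le_refl 0, by omega, rfl, fun t' h1 h2 => absurd (Nat.lt_of_lt_of_le h1 h2) (lt_irrefl 0)⟩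
      · rw [if_neg hv] at h
        simp [PySem.Dict.get?_empty] at h
  · intro v
    simp only [initB, PySem.Set.contains_iff, PySem.Set.mem_ofList, List.mem_singleton]
    constructor
    · rintro rfl; exact ⟨0, le_refl 0, le_refl 0, rfl⟩
    · rintro ⟨t, _, ht, hv⟩
      have ht0 : t = 0 := by simpa using ht
      subst ht0
      simpa using hv.symm
  · intro j hj; simp at hj
  · intro j j' _ hj'; simp at hj'
  · intro j hj; simp at hj
  · intro j _; exact getD_replicate_zero N j
  · intro _; rfl
  · intro h; omega
  · intro c2 h; omega

theorem assemble_nocut (N : Nat) (l : List Int) (x : Int) (dp dp2 : List Int)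
    (mp : PySem.Dict Int Int) (b xb : Int) (seen : PySem.Set Int) (c : Nat)
    (hb0 : 0 ≤ b)
    (hmap : ∀ v : Int,
      (mp.get? v = none ↔ ∀ t : Nat, t ≤ l.length → pxor (l.take t) ≠ v) ∧
      (∀ pre : Int, mp.get? v = some pre →
        ∃ t : Nat, t ≤ l.length ∧ pre = (t : Int) - 1 ∧ pxor (l.take t) = v ∧
          ∀ t' : Nat, t < t' → t' ≤ l.length → pxor (l.take t') ≠ v))
    (hc : c ≤ l.length)
    (hxb : xb = pxor (l.drop c))
    (hseen : ∀ v : Int, PySem.Set.contains seen v = true ↔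
      ∃ t : Nat, c ≤ t ∧ t ≤ l.length ∧ pxor ((l.take t).drop c) = v)
    (hd1 : ∀ j : Nat, j < l.length → c ≤ j + 1 → dp.getD j 0 = b)
    (hd2 : ∀ j j' : Nat, j ≤ j' → j' < l.length → dp.getD j 0 ≤ dp.getD j' 0)
    (hd5 : ∀ j : Nat, j < l.length → 0 ≤ dp.getD j 0)
    (hd7 : ∀ j : Nat, l.length ≤ j → dp.getD j 0 = 0)
    (hc0 : c = 0 → b = 0)
    (hc1 : c = 1 → b = 1)
    (hc2 : ∀ c2 : Nat, c = c2 + 2 → dp.getD c2 0 = b - 1)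
    (hlen2 : dp2.length = N)
    (hD' : ∀ j : Nat, dp2.getD j 0 = if j = l.length then b else dp.getD j 0) :
    LoopInv N (l ++ [x])
      (pxor (l ++ [x]), dp2, mp.insert (pxor (l ++ [x])) (l.length : Int))
      (b, PySem.Int.bxor xb x, PySem.Set.add seen (PySem.Int.bxor xb x)) := by
  obtain ⟨nd1, nd2, nd5, nd7, nc2⟩ :=
    dp_next_nocut l.length c b (fun j => dp.getD j 0) (fun j => dp2.getD j 0)
      hc hb0 hd1 hd2 hd5 hd7 hc2 hD'
  have hlen : (l ++ [x]).length = l.length + 1 := by simp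
  have htake_le : ∀ t : Nat, t ≤ l.length → (l ++ [x]).take t = l.take t := by
    intro t ht; rw [List.take_append_of_le_length ht]
  have htake_full : (l ++ [x]).take (l.length + 1) = l ++ [x] := by
    apply List.take_of_length_le; omega
  have hdrop : (l ++ [x]).drop c = l.drop c ++ [x] := by
    rw [List.drop_append_of_le_length hc]
  have hxbx : PySem.Int.bxor xb x = pxor (l.drop c ++ [x]) := by
    rw [hxb, pxor_append_singleton]
  refine ⟨hlen2, rfl, hb0, map_next l x mp hmap, c, by omega, ?_, ?_, ?_, ?_, ?_, ?_, hc0, hc1, nc2⟩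
  · rw [hxbx, hdrop]
  · intro v
    rw [PySem.Set.contains_iff, PySem.Set.mem_add]
    constructor
    · rintro (hv | rfl)
      · obtain ⟨t, h1, h2, h3⟩ := (hseen v).mp (by rw [PySem.Set.contains_iff]; exact hv)
        exact ⟨t, h1, by omega, by rw [htake_le t h2]; exact h3⟩
      · refine ⟨l.length + 1, by omega, by omega, ?_⟩
        rw [htake_full, hdrop, hxbx]
    · rintro ⟨t, h1, h2, h3⟩
      rcases Nat.lt_or_ge t (l.length + 1) with h' | h'
      · left
        have := (hseen v).mpr ⟨t, h1, by omega, by rw [← htake_le t (by omega)]; exact h3⟩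
        rw [PySem.Set.contains_iff] at this
        exact this
      · right
        have ht1 : t = l.length + 1 := by omega
        subst ht1
        rw [htake_full, hdrop] at h3
        rw [hxbx, h3]
  · intro j hj hcj
    rw [hlen] at hj
    exact nd1 j hj hcj
  · intro j j' hjj hj'
    rw [hlen] at hj'
    exact nd2 j j' hjj hj'
  · intro j hj
    rw [hlen] at hj
    exact nd5 j hj
  · intro j hj
    rw [hlen] at hj
    exact nd7 j hj

theorem assemble_cut (N : Nat) (l : List Int) (x : Int) (dp dp2 : List Int)
    (mp : PySem.Dict Int Int) (b : Int) (c : Nat)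
    (hb0 : 0 ≤ b)
    (hmap : ∀ v : Int,
      (mp.get? v = none ↔ ∀ t : Nat, t ≤ l.length → pxor (l.take t) ≠ v) ∧
      (∀ pre : Int, mp.get? v = some pre →
        ∃ t : Nat, t ≤ l.length ∧ pre = (t : Int) - 1 ∧ pxor (l.take t) = v ∧
          ∀ t' : Nat, t < t' → t' ≤ l.length → pxor (l.take t') ≠ v))
    (hc : c ≤ l.length)
    (hd1 : ∀ j : Nat, j < l.length → c ≤ j + 1 → dp.getD j 0 = b)
    (hd2 : ∀ j j' : Nat, j ≤ j' → j' < l.length → dp.getD j 0 ≤ dp.getD j' 0)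
    (hd5 : ∀ j : Nat, j < l.length → 0 ≤ dp.getD j 0)
    (hd7 : ∀ j : Nat, l.length ≤ j → dp.getD j 0 = 0)
    (hc0 : c = 0 → b = 0)
    (hlen2 : dp2.length = N)
    (hD' : ∀ j : Nat, dp2.getD j 0 = if j = l.length then b + 1 else dp.getD j 0) :
    LoopInv N (l ++ [x])
      (pxor (l ++ [x]), dp2, mp.insert (pxor (l ++ [x])) (l.length : Int))
      (b + 1, 0, PySem.Set.ofList [0]) := by
  obtain ⟨nd1, nd2, nd5, nd7, nc1, nc2⟩ :=
    dp_next_cut l.length c b (fun j => dp.getD j 0) (fun j => dp2.getD j 0)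
      hc hb0 hd1 hd2 hd5 hd7 hc0 hD'
  have hlen : (l ++ [x]).length = l.length + 1 := by simp
  have htake_full : (l ++ [x]).take (l.length + 1) = l ++ [x] := by
    apply List.take_of_length_le; omega
  have hdropfull : (l ++ [x]).drop (l.length + 1) = [] := by
    apply List.drop_eq_nil_of_le; omega
  refine ⟨hlen2, rfl, by omega, map_next l x mp hmap, l.length + 1, by omega, ?_, ?_, ?_, ?_, ?_, ?_, by omega, nc1, nc2⟩
  · rw [hdropfull]; rfl
  · intro v
    simp only [PySem.Set.contains_iff, PySem.Set.mem_ofList, List.mem_singleton]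
    constructor
    · rintro rfl
      refine ⟨l.length + 1, le_refl _, by omega, ?_⟩
      rw [htake_full, hdropfull]; rfl
    · rintro ⟨t, h1, h2, h3⟩
      rw [hlen] at h2
      have ht1 : t = l.length + 1 := by omega
      subst ht1
      rw [htake_full, hdropfull] at h3
      exact h3.symm
  · intro j hj hcj
    rw [hlen] at hj
    exact nd1 j hj hcj
  · intro j j' hjj hj'
    rw [hlen] at hj'
    exact nd2 j j' hjj hj'
  · intro j hj
    rw [hlen] at hj
    exact nd5 j hj
  · intro j hj
    rw [hlen] at hj
    exact nd7 j hj

theorem inv_step (N : Nat) (l : List Int) (x : Int) (sA : Int × List Int × PySem.Dict Int Int)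
    (sB : Int × Int × PySem.Set Int) (h : LoopInv N l sA sB) (hk : l.length < N) :
    LoopInv N (l ++ [x]) (stepA sA ((l.length : Int), x)) (stepB sB x) := by
  obtain ⟨xa, dp, mp⟩ := sA
  obtain ⟨b, xb, seen⟩ := sB
  obtain ⟨hlen, hxa, hb0, hmap, c, hc, hxb, hseen, hd1, hd2, hd5, hd7, hc0, hc1, hc2⟩ := h
  simp only at hlen hxa hxb hd1 hd2 hd5 hd7 hc2 hseen hb0 hc0 hc1
  subst hxa
  have hkdp : l.length < dp.length := by omega
  have hnx : PySem.Int.bxor (pxor l) x = pxor (l ++ [x]) := (pxor_append_singleton l x).symm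
  have hxbx : PySem.Int.bxor xb x = pxor (l.drop c ++ [x]) := by
    rw [hxb, pxor_append_singleton]
  have hbridge : ∀ t : Nat, c ≤ t → t ≤ l.length →
      (pxor (l.take t) = pxor (l ++ [x]) ↔ pxor ((l.take t).drop c) = pxor (l.drop c ++ [x])) := by
    intro t hct htl
    have hu : (l.take t).take c = l.take c := by
      rw [List.take_take, Nat.min_eq_left hct]
    have e1 : pxor (l.take t) = PySem.Int.bxor (pxor (l.take c)) (pxor ((l.take t).drop c)) := by
      conv_lhs => rw [pxor_split (l.take t) c]
      rw [hu]
    have e2 : pxor (l ++ [x]) = PySem.Int.bxor (pxor (l.take c)) (pxor (l.drop c ++ [x])) := by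
      conv_lhs => rw [pxor_split (l ++ [x]) c]
      rw [List.take_append_of_le_length hc, List.drop_append_of_le_length hc]
    rw [e1, e2]
    constructor
    · exact bxor_left_inj _ _ _
    · intro hh; rw [hh]
  have hBiff : PySem.Set.contains seen (PySem.Int.bxor xb x) = true ↔
      ∃ t : Nat, c ≤ t ∧ t ≤ l.length ∧ pxor ((l.take t).drop c) = pxor (l.drop c ++ [x]) := by
    rw [hxbx]; exact hseen _
  rcases hA : mp.get? (pxor (l ++ [x])) with _ | pre
  · -- not a prefix xor seen before: A takes no dp update from the dict, B does not cut
    have hno := (hmap (pxor (l ++ [x]))).1.mp hA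
    have hBfalse : PySem.Set.contains seen (PySem.Int.bxor xb x) = false := by
      rw [Bool.eq_false_iff]
      intro hT
      obtain ⟨t, h1, h2, h3⟩ := hBiff.mp hT
      exact hno t h2 ((hbridge t h1 h2).mpr h3)
    have hsB : stepB (b, xb, seen) x =
        (b, PySem.Int.bxor xb x, PySem.Set.add seen (PySem.Int.bxor xb x)) := by
      simp only [stepB, hBfalse]
      simp
    by_cases hk0 : l.length = 0
    · have hcc : c = 0 := by omega
      have hbb : b = 0 := hc0 hcc
      have hsA : stepA (pxor l, dp, mp) ((l.length : Int), x) =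
          (pxor (l ++ [x]), dp, mp.insert (pxor (l ++ [x])) (l.length : Int)) := by
        simp only [stepA, hnx, hA]
        rw [if_neg (show ¬ ((l.length : Int) > 0) by omega)]
      rw [hsA, hsB]
      refine assemble_nocut N l x dp dp mp b xb seen c hb0 hmap hc hxb hseen hd1 hd2 hd5 hd7 hc0 hc1 hc2 hlen ?_
      intro j
      rcases eq_or_ne j l.length with rfl | hne
      · rw [if_pos rfl, hd7 l.length (le_refl _), hbb]
      · rw [if_neg hne]
    · have e1 : ((l.length : Int) - 1) = ((l.length - 1 : Nat) : Int) := by omega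
      have hsA : stepA (pxor l, dp, mp) ((l.length : Int), x) =
          (pxor (l ++ [x]),
            dp.set l.length (max (dp.getD l.length 0) (dp.getD (l.length - 1) 0)),
            mp.insert (pxor (l ++ [x])) (l.length : Int)) := by
        simp only [stepA, hnx, hA]
        rw [if_pos (show ((l.length : Int) > 0) by omega)]
        rw [e1]
        simp only [PySem.List.pyGetD_natCast, PySem.List.pySetD_natCast]
      rw [hsA, hsB]
      refine assemble_nocut N l x dp _ mp b xb seen c hb0 hmap hc hxb hseen hd1 hd2 hd5 hd7 hc0 hc1 hc2
        (by rw [List.length_set]; exact hlen) ?_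
      have hw : max (dp.getD l.length 0) (dp.getD (l.length - 1) 0) = b := by
        rw [hd7 l.length (le_refl _), hd1 (l.length - 1) (by omega) (by omega)]
        exact max_eq_right hb0
      intro j
      rw [getD_set_int dp l.length j _ hkdp, hw]
  · -- the new prefix xor occurred before, at latest position ts
    obtain ⟨ts, hts, hpre, hpx, hmax⟩ := (hmap (pxor (l ++ [x]))).2 pre hA
    by_cases hct : c ≤ ts
    · -- it occurred since the last greedy cut: B cuts, A's dp gains one
      have hBtrue : PySem.Set.contains seen (PySem.Int.bxor xb x) = true :=
        hBiff.mpr ⟨ts, hct, hts, (hbridge ts hct hts).mp hpx⟩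
      have hsB : stepB (b, xb, seen) x = (b + 1, 0, PySem.Set.ofList [0]) := by
        simp only [stepB, hBtrue]
        simp
      have hval : (if pre = -1 then (1 : Int) else PySem.List.pyGetD dp pre 0 + 1) = b + 1 := by
        rcases Nat.eq_zero_or_pos ts with h0 | h1
        · rw [if_pos (by omega)]
          have hcc : c = 0 := by omega
          rw [hc0 hcc]
          norm_num
        · rw [if_neg (by omega)]
          have e2 : pre = ((ts - 1 : Nat) : Int) := by omega
          rw [e2, PySem.List.pyGetD_natCast]
          rw [hd1 (ts - 1) (by omega) (by omega)]
      by_cases hk0 : l.length = 0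
      · have hsA : stepA (pxor l, dp, mp) ((l.length : Int), x) =
            (pxor (l ++ [x]), dp.set l.length (b + 1),
              mp.insert (pxor (l ++ [x])) (l.length : Int)) := by
          simp only [stepA, hnx, hA]
          rw [if_neg (show ¬ ((l.length : Int) > 0) by omega)]
          rw [hval]
          simp only [PySem.List.pySetD_natCast]
        rw [hsA, hsB]
        refine assemble_cut N l x dp _ mp b c hb0 hmap hc hd1 hd2 hd5 hd7 hc0
          (by rw [List.length_set]; exact hlen) ?_
        intro j
        rw [getD_set_int dp l.length j _ hkdp]
      · have e1 : ((l.length : Int) - 1) = ((l.length - 1 : Nat) : Int) := by omega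
        have hsA : stepA (pxor l, dp, mp) ((l.length : Int), x) =
            (pxor (l ++ [x]),
              (dp.set l.length (b + 1)).set l.length
                (max ((dp.set l.length (b + 1)).getD l.length 0)
                     ((dp.set l.length (b + 1)).getD (l.length - 1) 0)),
              mp.insert (pxor (l ++ [x])) (l.length : Int)) := by
          simp only [stepA, hnx, hA]
          rw [if_pos (show ((l.length : Int) > 0) by omega)]
          rw [hval, e1]
          simp only [PySem.List.pyGetD_natCast, PySem.List.pySetD_natCast]
        rw [hsA, hsB]
        have hkdp1 : l.length < (dp.set l.length (b + 1)).length := by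
          rw [List.length_set]; exact hkdp
        refine assemble_cut N l x dp _ mp b c hb0 hmap hc hd1 hd2 hd5 hd7 hc0
          (by rw [List.length_set, List.length_set]; exact hlen) ?_
        have g1 : (dp.set l.length (b + 1)).getD l.length 0 = b + 1 := by
          rw [getD_set_int dp l.length l.length _ hkdp, if_pos rfl]
        have g2 : (dp.set l.length (b + 1)).getD (l.length - 1) 0 = dp.getD (l.length - 1) 0 := by
          rw [getD_set_int dp l.length (l.length - 1) _ hkdp, if_neg (by omega)]
        intro j
        rw [getD_set_int _ l.length j _ hkdp1, g1, g2,
          hd1 (l.length - 1) (by omega) (by omega), max_eq_left (by omega)]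
        rcases eq_or_ne j l.length with rfl | hne
        · rw [if_pos rfl, if_pos rfl]
        · rw [if_neg hne, if_neg hne, getD_set_int dp l.length j _ hkdp, if_neg hne]
    · -- it last occurred strictly before the cut: neither side's count moves
      have hcpos : 1 ≤ c := by omega
      have hkpos : 1 ≤ l.length := by omega
      have hBfalse : PySem.Set.contains seen (PySem.Int.bxor xb x) = false := by
        rw [Bool.eq_false_iff]
        intro hT
        obtain ⟨t, h1, h2, h3⟩ := hBiff.mp hT
        exact hmax t (by omega) h2 ((hbridge t h1 h2).mpr h3)
      have hsB : stepB (b, xb, seen) x =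
          (b, PySem.Int.bxor xb x, PySem.Set.add seen (PySem.Int.bxor xb x)) := by
        simp only [stepB, hBfalse]
        simp
      have hval_le : (if pre = -1 then (1 : Int) else PySem.List.pyGetD dp pre 0 + 1) ≤ b := by
        rcases Nat.eq_zero_or_pos ts with h0 | h1
        · rw [if_pos (by omega)]
          rcases Nat.lt_or_ge c 2 with hc' | hc'
          · have hcc : c = 1 := by omega
            rw [hc1 hcc]
          · have h2 := hc2 (c - 2) (by omega)
            have h5 := hd5 (c - 2) (by omega)
            omega
        · rw [if_neg (by omega)]
          have e2 : pre = ((ts - 1 : Nat) : Int) := by omega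
          rw [e2, PySem.List.pyGetD_natCast]
          have h2 := hc2 (c - 2) (by omega)
          have hm := hd2 (ts - 1) (c - 2) (by omega) (by omega)
          omega
      have e1 : ((l.length : Int) - 1) = ((l.length - 1 : Nat) : Int) := by omega
      have hsA : stepA (pxor l, dp, mp) ((l.length : Int), x) =
          (pxor (l ++ [x]),
            (dp.set l.length (if pre = -1 then (1 : Int) else PySem.List.pyGetD dp pre 0 + 1)).set l.length
              (max ((dp.set l.length (if pre = -1 then (1 : Int) else PySem.List.pyGetD dp pre 0 + 1)).getD l.length 0)
                   ((dp.set l.length (if pre = -1 then (1 : Int) else PySem.List.pyGetD dp pre 0 + 1)).getD (l.length - 1) 0)),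
            mp.insert (pxor (l ++ [x])) (l.length : Int)) := by
        simp only [stepA, hnx, hA]
        rw [PySem.List.pySetD_natCast]
        rw [if_pos (show ((l.length : Int) > 0) by omega)]
        rw [e1]
        simp only [PySem.List.pyGetD_natCast, PySem.List.pySetD_natCast]
      rw [hsA, hsB]
      have hkdp1 : l.length < (dp.set l.length (if pre = -1 then (1 : Int) else PySem.List.pyGetD dp pre 0 + 1)).length := by
        rw [List.length_set]; exact hkdp
      refine assemble_nocut N l x dp _ mp b xb seen c hb0 hmap hc hxb hseen hd1 hd2 hd5 hd7 hc0 hc1 hc2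
        (by rw [List.length_set, List.length_set]; exact hlen) ?_
      have g1 : (dp.set l.length (if pre = -1 then (1 : Int) else PySem.List.pyGetD dp pre 0 + 1)).getD l.length 0 =
          (if pre = -1 then (1 : Int) else PySem.List.pyGetD dp pre 0 + 1) := by
        rw [getD_set_int dp l.length l.length _ hkdp, if_pos rfl]
      have g2 : (dp.set l.length (if pre = -1 then (1 : Int) else PySem.List.pyGetD dp pre 0 + 1)).getD (l.length - 1) 0 =
          dp.getD (l.length - 1) 0 := by
        rw [getD_set_int dp l.length (l.length - 1) _ hkdp, if_neg (by omega)]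
      intro j
      rw [getD_set_int _ l.length j _ hkdp1, g1, g2,
        hd1 (l.length - 1) (by omega) (by omega), max_eq_right hval_le]
      rcases eq_or_ne j l.length with rfl | hne
      · rw [if_pos rfl, if_pos rfl]
      · rw [if_neg hne, if_neg hne, getD_set_int dp l.length j _ hkdp, if_neg hne]

theorem inv_all (N : Nat) (arr : List Int) (hN : arr.length ≤ N) :
    LoopInv N arr ((PySem.List.enumerate arr 0).foldl stepA (initA N)) (arr.foldl stepB initB) := by
  induction arr using List.reverseRecOn with
  | nil => simpa [PySem.List.enumerate] using inv_init N
  | append_singleton l x ih =>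
      have hl : l.length < N := by simpa using Nat.lt_of_lt_of_le (by simp) hN
      have h := inv_step N l x _ _ (ih (Nat.le_of_lt hl)) hl
      rw [PySem.List.enumerate_append, List.foldl_append, List.foldl_append]
      simpa [PySem.List.enumerate] using h

theorem mostEOR_spec : Claim_equal_mostEOR := by
  intro arr _ hpre
  unfold Spec_mostEOR
  rw [bridgeB, bridgeA]
  obtain ⟨hlen, hxa, hb0, hmap, c, hc, hxb, hseen, hd1, hd2, hd5, hd7, hc0, hc1, hc2⟩ :=
    inv_all arr.length arr (le_refl _)
  have hN : 1 ≤ arr.length := by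
    cases arr with
    | nil => exact absurd rfl hpre
    | cons a l => simp
  have hcast : ((arr.length : Int) - 1) = ((arr.length - 1 : Nat) : Int) := by omega
  rw [hcast, PySem.List.pyGetD_natCast]
  exact hd1 (arr.length - 1) (by omega) (by omega)
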